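-- pv_equiv track=rewrite | github.com/Dr4k3z/adv_of_code | 6-dec-2025/main.py | parse_cephalopod
-- ===== SOURCE A (Python) =====
-- def parse_cephalopod(lines: list[str]) -> list[list[int]]:
--     if not lines:
--         return []
--
--     height = len(lines)
--     width = max(len(line) for line in lines)
--
--     grid = [line.ljust(width) for line in lines]
--
--     problems: list[list[int]] = []
--
--     col = 0
--     while col < width:
--         if all(grid[row][col] == " " for row in range(height)):
--             col += 1
--             continue
--
--         group_cols: list[int] = []
--         while col < width and not all(grid[row][col] == " " for row in range(height)):
--             group_cols.append(col)
--             col += 1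
--
--         column_numbers: list[int] = []
--         for c in group_cols:
--             digits = [
--                 grid[row][c]
--                 for row in range(height - 1)  # exclude bottom row (operators)
--                 if grid[row][c] != " "
--             ]
--             column_numbers.append(int("".join(digits)))
--
--         problems.append(list(reversed(column_numbers)))
--
--     problems.reverse()
--     return problems
-- ===== SOURCE B (Python) =====
-- def parse_cephalopod(lines: list[str]) -> list[list[int]]:
--     # Row-major single pass: accumulate each column's digit string in a dict
--     # keyed by column index (no padding, no transposition, no per-column scans);
--     # occupied columns = dict keys plus the bottom row's non-space columns; one
--     # scan over the column indices splits them into maximal contiguous runs.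
--     if not lines:
--         return []
--     width = max(len(line) for line in lines)
--     digits: dict[int, str] = {}
--     for line in lines[:-1]:
--         for c, ch in enumerate(line):
--             if ch != " ":
--                 digits[c] = digits.get(c, "") + ch
--     occupied = set(digits)
--     for c, ch in enumerate(lines[-1]):
--         if ch != " ":
--             occupied.add(c)
--     problems: list[list[int]] = []
--     group: list[int] = []
--     for c in range(width):
--         if c in occupied:
--             group.append(int(digits[c]))
--         elif group:
--             problems.append(group[::-1])
--             group = []
--     if group:
--         problems.append(group[::-1])
--     problems.reverse()
--     return problems
-- ===== Notes on version B (the rewrite author's own statement) =====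
-- stated objective: alternative
-- what changed: Replaces A's column-major nested while-loops over a ljust-padded grid (per-column scans of all rows) with a single row-major pass that accumulates each column's digit string in a dict and its occupied columns in a set, followed by one scan over column indices that splits them into runs; no padding or per-column row scans.
import Mathlib
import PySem

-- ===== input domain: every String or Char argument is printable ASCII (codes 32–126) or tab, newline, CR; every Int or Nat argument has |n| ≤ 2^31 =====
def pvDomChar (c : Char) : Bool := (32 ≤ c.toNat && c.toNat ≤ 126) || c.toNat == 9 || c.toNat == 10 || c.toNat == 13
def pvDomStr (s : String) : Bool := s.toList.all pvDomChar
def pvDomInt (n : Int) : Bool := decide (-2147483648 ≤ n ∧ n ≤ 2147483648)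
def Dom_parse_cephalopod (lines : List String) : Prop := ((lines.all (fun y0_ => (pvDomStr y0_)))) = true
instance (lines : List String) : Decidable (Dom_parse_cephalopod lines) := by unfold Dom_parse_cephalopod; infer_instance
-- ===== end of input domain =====

-- B replaces A's column-major nested while-loops over a ljust-padded grid with a single
-- row-major pass accumulating each column's digit string in a dict (plus an occupied set),
-- then one scan over column indices splits the runs — alternative algorithm, same cost.

-- ===== PORT A =====
-- grid[row][col]: all indices reached by the port lie inside the padded grid, so getD is exact
def pvCell (grid : List (List Char)) (r c : Nat) : Char := (grid.getD r []).getD c ' '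

-- all(grid[row][col] == " " for row in range(height))
def pvAllSpaceA (grid : List (List Char)) (h c : Nat) : Bool :=
  (List.range h).all (fun r => pvCell grid r c == ' ')

-- int("".join(digits)); inside Pre_ the joined string parses, so ofStr? is some and the
-- getD 0 default is never taken
def pvNumA (grid : List (List Char)) (h c : Nat) : Int :=
  (PySem.Int.ofStr? (String.ofList
    (((List.range (h - 1)).map (fun r => pvCell grid r c)).filter (fun ch => ch != ' ')))).getD 0

-- inner while: collect the group's column indices and the index where the scan stopped
-- (structural recursion on the exact fuel w - c, a totality guard only: at fuel 0, c >= w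
-- and the loop condition is false anyway)
def pvInnerAGo (grid : List (List Char)) (h w : Nat) : Nat → Nat → List Nat × Nat
  | 0, c => ([], c)
  | fuel + 1, c =>
    if c < w ∧ pvAllSpaceA grid h c = false then
      let r := pvInnerAGo grid h w fuel (c + 1)
      (c :: r.1, r.2)
    else ([], c)

def pvInnerA (grid : List (List Char)) (h w c : Nat) : List Nat × Nat :=
  pvInnerAGo grid h w (w - c) c

-- outer while over col; problems collected in order (the final .reverse is applied by the
-- caller); same exact-fuel guard
def pvOuterAGo (grid : List (List Char)) (h w : Nat) : Nat → Nat → List (List Int)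
  | 0, _ => []
  | fuel + 1, c =>
    if c < w then
      if pvAllSpaceA grid h c = true then pvOuterAGo grid h w fuel (c + 1)
      else
        let r := pvInnerA grid h w c
        ((r.1.map (pvNumA grid h)).reverse) :: pvOuterAGo grid h w fuel r.2
    else []

def pvOuterA (grid : List (List Char)) (h w c : Nat) : List (List Int) :=
  pvOuterAGo grid h w (w - c) c

-- line.ljust(width) on the char list
def pvLjust (l : String) (w : Nat) : List Char :=
  l.toList ++ List.replicate (w - l.toList.length) ' '

def parse_cephalopod (lines : List String) : List (List Int) :=
  if lines = [] then []
  else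
    let h := lines.length
    -- width = max(len(line) for line in lines): lengths are Nats; lines ≠ [] so max? is some
    let w := ((lines.map (fun l => l.toList.length)).max?).getD 0
    let grid := lines.map (fun l => pvLjust l w)
    (pvOuterA grid h w 0).reverse

-- ===== PORT B =====
-- digits[c] = digits.get(c, "") + ch (strings kept as their char lists)
def pvRowStepB (digits : PySem.Dict Int (List Char)) (p : Int × Char) : PySem.Dict Int (List Char) :=
  if p.2 ≠ ' ' then digits.insert p.1 (digits.getD p.1 [] ++ [p.2]) else digits

-- the two nested for-loops over lines[:-1] with enumerate(line)
def pvDigitsB (lines : List String) : PySem.Dict Int (List Char) :=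
  lines.dropLast.foldl (fun d line => (PySem.List.enumerate line.toList).foldl pvRowStepB d)
    PySem.Dict.empty

-- occupied = set(digits), then the for-loop over enumerate(lines[-1]) adding indices
def pvOccB (lines : List String) : PySem.Set Int :=
  (PySem.List.enumerate (lines.getLast?.getD "").toList).foldl
    (fun s p => if p.2 ≠ ' ' then PySem.Set.add s p.1 else s)
    (PySem.Set.ofList (pvDigitsB lines).keys)

-- int(digits[c]); digits[c] raises KeyError and int("…") ValueError only outside Pre_,
-- so neither getD default is ever taken inside Pre_
def pvValB (digits : PySem.Dict Int (List Char)) (c : Int) : Int :=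
  (PySem.Int.ofChars? ((digits.get? c).getD [])).getD 0

-- "if group: problems.append(group[::-1]); group = []" (used in the elif and after the loop)
def pvFlushB (st : List Int × List (List Int)) : List Int × List (List Int) :=
  if st.1 ≠ [] then ([], st.2 ++ [st.1.reverse]) else st

-- body of "for c in range(width)"
def pvGroupStepB (digits : PySem.Dict Int (List Char)) (occ : PySem.Set Int)
    (st : List Int × List (List Int)) (c : Int) : List Int × List (List Int) :=
  if PySem.Set.contains occ c then (st.1 ++ [pvValB digits c], st.2) else pvFlushB st

def parse_cephalopod_alt (lines : List String) : List (List Int) :=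
  if lines = [] then []
  else
    let w : Nat := ((lines.map (fun l => l.toList.length)).max?).getD 0
    let digits := pvDigitsB lines
    let occ := pvOccB lines
    let st := (PySem.List.pyRange 0 (w : Int) 1).foldl (pvGroupStepB digits occ) ([], [])
    (pvFlushB st).2.reverse

-- ===== PRECONDITION & SPEC =====
-- the non-space characters of column c over all rows but the last (A joins exactly these)
def pvColChars (lines : List String) (c : Nat) : List Char :=
  (lines.dropLast.map (fun l => l.toList.getD c ' ')).filter (fun ch => ch != ' ')

-- Pre_ excludes exactly the inputs on which Python A raises ValueError: a column that is
-- non-space in some row but whose non-space characters above the bottom row do not parse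
-- as an int (e.g. empty, or containing a non-digit character).
def Pre_parse_cephalopod (lines : List String) : Prop :=
  ∀ c : Nat, c < ((lines.map (fun l => l.toList.length)).max?).getD 0 →
    lines.any (fun l => l.toList.getD c ' ' != ' ') = true →
    (PySem.Int.ofChars? (pvColChars lines c)).isSome = true
instance (lines : List String) : Decidable (Pre_parse_cephalopod lines) := by
  unfold Pre_parse_cephalopod; infer_instance

def pvWitness_parse_cephalopod : List String := ["12", " 3", "+*"]

def Spec_parse_cephalopod (lines : List String) (out : List (List Int)) : Prop :=
  out = parse_cephalopod_alt lines
instance (lines : List String) (out : List (List Int)) : Decidable (Spec_parse_cephalopod lines out) := by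
  unfold Spec_parse_cephalopod; infer_instance

-- ===== CLAIM (what is proved, stated in full; the proofs are below) =====
def Claim_equal_parse_cephalopod : Prop :=
  ∀ (lines : List String), Dom_parse_cephalopod lines → Pre_parse_cephalopod lines →
    Spec_parse_cephalopod lines (parse_cephalopod lines)

-- ===== LEMMAS AND PROOFS =====
-- List.range' c (w-c) steps one column at a time
theorem pvRange'_cons (c w : Nat) (hc : c < w) :
    List.range' c (w - c) = c :: List.range' (c + 1) (w - (c + 1)) := by
  have h : w - c = (w - (c + 1)) + 1 := by omega
  rw [h, List.range'_succ]

-- one row of B's accumulation pass, pointwise on the dict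
theorem pvRowAux (row : List Char) : ∀ (s : Nat) (d : PySem.Dict Int (List Char)) (k : Nat),
    ((PySem.List.enumerate row (s : Int)).foldl pvRowStepB d).get? (k : Int) =
      if s ≤ k ∧ row.getD (k - s) ' ' ≠ ' '
      then some (d.getD (k : Int) [] ++ [row.getD (k - s) ' '])
      else d.get? (k : Int) := by
  induction row with
  | nil =>
    intro s d k
    simp [PySem.List.enumerate]
  | cons ch rest ih =>
    intro s d k
    rw [PySem.List.enumerate_cons, List.foldl_cons]
    have hcast : (s : Int) + 1 = ((s + 1 : Nat) : Int) := by push_cast; ring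
    rw [hcast, ih (s + 1) (pvRowStepB d (s, ch)) k]
    by_cases hk : k = s
    · subst hk
      have h1 : ¬ (k + 1 ≤ k ∧ rest.getD (k - (k + 1)) ' ' ≠ ' ') := by omega
      rw [if_neg h1]
      unfold pvRowStepB
      by_cases hch : ch ≠ ' '
      · rw [if_pos hch]
        rw [PySem.Dict.get?_insert_self]
        have h2 : k ≤ k ∧ (ch :: rest).getD (k - k) ' ' ≠ ' ' :=
          ⟨le_refl k, by simpa using hch⟩
        rw [if_pos h2]
        simp
      · rw [if_neg hch]
        push Not at hch
        subst hch
        have h2 : ¬ (k ≤ k ∧ (' ' :: rest).getD (k - k) ' ' ≠ ' ') := by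
          simp
        rw [if_neg h2]
    · have hne : (k : Int) ≠ (s : Int) := by exact_mod_cast hk
      have hget : (pvRowStepB d (s, ch)).get? (k : Int) = d.get? (k : Int) := by
        unfold pvRowStepB
        by_cases hch : ch ≠ ' '
        · rw [if_pos hch]
          rw [PySem.Dict.get?_insert]
          rw [if_neg hne]
        · rw [if_neg hch]
      have hgetD : (pvRowStepB d (s, ch)).getD (k : Int) [] = d.getD (k : Int) [] := by
        rw [PySem.Dict.getD_eq_get?_getD, hget, ← PySem.Dict.getD_eq_get?_getD]
      rw [hget, hgetD]
      by_cases hs : s ≤ k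
      · have hs1 : s + 1 ≤ k := by omega
        have hidx : (ch :: rest).getD (k - s) ' ' = rest.getD (k - (s + 1)) ' ' := by
          have h3 : k - s = (k - (s + 1)) + 1 := by omega
          rw [h3]
          simp
        rw [hidx]
        by_cases hrest : rest.getD (k - (s + 1)) ' ' ≠ ' '
        · rw [if_pos ⟨hs1, hrest⟩, if_pos ⟨hs, hrest⟩]
        · rw [if_neg (by tauto), if_neg (by tauto)]
      · rw [if_neg (by omega), if_neg (by omega)]

-- B's full accumulation over the rows, pointwise on the dict
theorem pvDigitsAux (rows : List String) : ∀ (d : PySem.Dict Int (List Char)) (c : Nat),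
    ((rows.foldl (fun d line => (PySem.List.enumerate line.toList).foldl pvRowStepB d) d).get? (c : Int)) =
      if ((rows.map (fun l => l.toList.getD c ' ')).filter (fun ch => ch != ' ')) = []
      then d.get? (c : Int)
      else some (d.getD (c : Int) [] ++
        ((rows.map (fun l => l.toList.getD c ' ')).filter (fun ch => ch != ' '))) := by
  induction rows with
  | nil => intro d c; simp
  | cons l rest ih =>
    intro d c
    rw [List.foldl_cons, ih]
    have hrow : ((PySem.List.enumerate l.toList).foldl pvRowStepB d).get? (c : Int) =
        if l.toList.getD c ' ' ≠ ' '
        then some (d.getD (c : Int) [] ++ [l.toList.getD c ' '])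
        else d.get? (c : Int) := by
      simpa using pvRowAux l.toList 0 d c
    have hrowD : ((PySem.List.enumerate l.toList).foldl pvRowStepB d).getD (c : Int) [] =
        if l.toList.getD c ' ' ≠ ' '
        then d.getD (c : Int) [] ++ [l.toList.getD c ' ']
        else d.getD (c : Int) [] := by
      rw [PySem.Dict.getD_eq_get?_getD, hrow]
      split_ifs
      · simp
      · rw [← PySem.Dict.getD_eq_get?_getD]
    by_cases hch : l.toList.getD c ' ' = ' '
    · rw [List.map_cons]
      have hf : ((l.toList.getD c ' ' :: rest.map (fun l => l.toList.getD c ' ')).filter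
          (fun ch => ch != ' ')) = ((rest.map (fun l => l.toList.getD c ' ')).filter
          (fun ch => ch != ' ')) := by
        rw [List.filter_cons]
        simp only [hch]
        simp
      rw [hf]
      rw [if_neg (by simp only [hch]; simp) ] at hrow
      rw [if_neg (by simp only [hch]; simp) ] at hrowD
      rw [hrow, hrowD]
    · rw [List.map_cons]
      have hf : ((l.toList.getD c ' ' :: rest.map (fun l => l.toList.getD c ' ')).filter
          (fun ch => ch != ' ')) = l.toList.getD c ' ' ::
            ((rest.map (fun l => l.toList.getD c ' ')).filter (fun ch => ch != ' ')) := by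
        rw [List.filter_cons]
        rw [if_pos (by simpa using hch)]
      rw [hf]
      rw [if_pos hch] at hrow
      rw [if_pos hch] at hrowD
      rw [hrow, hrowD]
      rw [if_neg (List.cons_ne_nil _ _)]
      split_ifs with h1
      · rw [h1]
      · simp

theorem pvDigits_get? (lines : List String) (c : Nat) :
    (pvDigitsB lines).get? (c : Int) =
      if pvColChars lines c = [] then none else some (pvColChars lines c) := by
  unfold pvDigitsB pvColChars
  rw [pvDigitsAux]
  simp [PySem.Dict.get?_empty, PySem.Dict.getD_eq_get?_getD]

-- membership through the occupied-set fold over the bottom row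
theorem pvMemFoldAdd (xs : List Char) : ∀ (s : Int) (st : PySem.Set Int) (k : Int),
    (k ∈ (PySem.List.enumerate xs s).foldl
        (fun s p => if p.2 ≠ ' ' then PySem.Set.add s p.1 else s) st) ↔
      k ∈ st ∨ ∃ j : Nat, j < xs.length ∧ k = s + j ∧ xs.getD j ' ' ≠ ' ' := by
  induction xs with
  | nil => intro s st k; simp [PySem.List.enumerate]
  | cons ch rest ih =>
    intro s st k
    rw [PySem.List.enumerate_cons, List.foldl_cons]
    rw [ih (s + 1)]
    constructor
    · rintro (hmem | ⟨j, hj, hk, hne⟩)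
      · by_cases hch : ch ≠ ' '
        · rw [if_pos hch] at hmem
          rw [PySem.Set.mem_add] at hmem
          rcases hmem with hmem | rfl
          · exact Or.inl hmem
          · exact Or.inr ⟨0, by simp, by simp, by simpa using hch⟩
        · rw [if_neg hch] at hmem
          exact Or.inl hmem
      · refine Or.inr ⟨j + 1, by simp only [List.length_cons]; omega, by push_cast; omega, by simpa using hne⟩
    · rintro (hmem | ⟨j, hj, hk, hne⟩)
      · left
        by_cases hch : ch ≠ ' '
        · rw [if_pos hch, PySem.Set.mem_add]; exact Or.inl hmem
        · rw [if_neg hch]; exact hmem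
      · cases j with
        | zero =>
          left
          simp at hne hk
          rw [if_pos (by simpa using hne), PySem.Set.mem_add]
          right
          omega
        | succ j =>
          right
          exact ⟨j, by simp only [List.length_cons] at hj; omega, by push_cast at hk ⊢; omega, by simpa using hne⟩

-- the padded grid reads like the raw lines (padding is spaces, default is space)
theorem pvLjust_getD (l : String) (w c : Nat) :
    (pvLjust l w).getD c ' ' = l.toList.getD c ' ' := by
  unfold pvLjust
  rw [List.getD_eq_getElem?_getD, List.getD_eq_getElem?_getD]
  rcases lt_or_ge c l.toList.length with hlt | hge
  · rw [List.getElem?_append_left hlt]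
  · rw [List.getElem?_append_right hge, List.getElem?_replicate,
      List.getElem?_eq_none hge]
    split_ifs <;> simp

theorem pv_range_all (l : List (List Char)) (f : List Char → Bool) :
    ((List.range l.length).all (fun r => f (l.getD r []))) = l.all f := by
  induction l with
  | nil => simp
  | cons a t ih =>
    rw [List.length_cons, List.range_succ_eq_map]
    simp only [List.all_cons, List.all_map]
    simp only [List.getD_cons_zero, Function.comp_def, List.getD_cons_succ]
    rw [← ih]

-- A's all-space test over the padded grid, on the raw lines
theorem pvAllSpaceA_iff (lines : List String) (w c : Nat) :
    pvAllSpaceA (lines.map (fun l => pvLjust l w)) lines.length c = false ↔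
      ∃ l ∈ lines, l.toList.getD c ' ' ≠ ' ' := by
  unfold pvAllSpaceA pvCell
  have hlen : lines.length = (lines.map (fun l => pvLjust l w)).length := by simp
  rw [hlen, pv_range_all (lines.map (fun l => pvLjust l w)) (fun row => row.getD c ' ' == ' '),
    List.all_map]
  have hcongr : (lines.all (fun l => (pvLjust l w).getD c ' ' == ' ')) =
      lines.all (fun l => l.toList.getD c ' ' == ' ') := by
    simp only [pvLjust_getD]
  rw [Function.comp_def]
  rw [hcongr]
  rw [List.all_eq_false]
  simp

-- B's occupied test agrees with (the negation of) A's all-space test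
theorem pvOcc_iff (lines : List String) (hne : lines ≠ []) (w c : Nat) :
    (PySem.Set.contains (pvOccB lines) (c : Int) = true) ↔
      pvAllSpaceA (lines.map (fun l => pvLjust l w)) lines.length c = false := by
  have hkeys : ((c : Int) ∈ PySem.Set.ofList (pvDigitsB lines).keys) ↔ pvColChars lines c ≠ [] := by
    rw [PySem.Set.mem_ofList]
    have hiff := PySem.Dict.get?_eq_none_iff_not_mem_keys (pvDigitsB lines) (c : Int)
    rw [pvDigits_get? lines c] at hiff
    constructor
    · intro hm hnil
      rw [if_pos hnil] at hiff
      exact (hiff.mp rfl) hm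
    · intro hnil
      by_contra hm
      rw [if_neg hnil] at hiff
      exact Option.some_ne_none _ (hiff.mpr hm)
  have hlast : (∃ j : Nat, j < (lines.getLast?.getD "").toList.length ∧
        (c : Int) = 0 + (j : Int) ∧ (lines.getLast?.getD "").toList.getD j ' ' ≠ ' ') ↔
      (lines.getLast?.getD "").toList.getD c ' ' ≠ ' ' := by
    constructor
    · rintro ⟨j, hj, hcj, hne'⟩
      have hjc : j = c := by
        have : (c : Int) = (j : Int) := by simpa using hcj
        exact_mod_cast this.symm
      subst hjc
      exact hne'
    · intro hcc
      by_cases hlt : c < (lines.getLast?.getD "").toList.length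
      · exact ⟨c, hlt, by simp, hcc⟩
      · exfalso
        apply hcc
        rw [List.getD_eq_default]
        omega
  have hcol : pvColChars lines c ≠ [] ↔ ∃ l ∈ lines.dropLast, l.toList.getD c ' ' ≠ ' ' := by
    unfold pvColChars
    rw [Ne, List.filter_eq_nil_iff]
    simp only [List.mem_map, bne_iff_ne, ne_eq, not_forall]
    constructor
    · rintro ⟨x, ⟨l, hl, rfl⟩, hp⟩
      exact ⟨l, hl, by tauto⟩
    · rintro ⟨l, hl, hp⟩
      exact ⟨l.toList.getD c ' ', ⟨l, hl, rfl⟩, by tauto⟩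
  have hsplit : lines.dropLast ++ [lines.getLast?.getD ""] = lines := by
    rw [List.getLast?_eq_getLast hne]
    exact List.dropLast_concat_getLast hne
  rw [pvAllSpaceA_iff]
  unfold pvOccB
  simp only [PySem.Set.contains]
  rw [List.contains_iff_mem, pvMemFoldAdd, hkeys, hlast, hcol]
  constructor
  · rintro (⟨l, hl, hp⟩ | hp)
    · exact ⟨l, by rw [← hsplit]; exact List.mem_append_left _ hl, hp⟩
    · exact ⟨_, by rw [← hsplit]; exact List.mem_append_right _ (by simp), hp⟩
  · rintro ⟨l, hl, hp⟩
    rw [← hsplit] at hl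
    rcases List.mem_append.mp hl with h | h
    · exact Or.inl ⟨l, h, hp⟩
    · right
      have hl2 : l = lines.getLast?.getD "" := by simpa using h
      rw [← hl2]
      exact hp

theorem pv_range_map_take {α β : Type} (l : List α) (f : α → β) (d : α) :
    ∀ n, n ≤ l.length → (List.range n).map (fun r => f (l.getD r d)) = (l.take n).map f := by
  induction l with
  | nil =>
    intro n hn
    have : n = 0 := by simpa using hn
    subst this
    simp
  | cons a t ih =>
    intro n hn
    cases n with
    | zero => simp
    | succ m =>
      rw [List.range_succ_eq_map]
      simp only [List.map_cons, List.map_map, List.take_succ_cons, List.getD_cons_zero]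
      have := ih m (by simpa using hn)
      rw [← this]
      simp [Function.comp_def]

-- the digit string A joins for column c is exactly B's accumulated string
theorem pvColCharsA (lines : List String) (w c : Nat) :
    ((List.range (lines.length - 1)).map
        (fun r => pvCell (lines.map (fun l => pvLjust l w)) r c)).filter (fun ch => ch != ' ') =
      pvColChars lines c := by
  have h1 : (List.range (lines.length - 1)).map
        (fun r => pvCell (lines.map (fun l => pvLjust l w)) r c) =
      ((lines.map (fun l => pvLjust l w)).take (lines.length - 1)).map
        (fun row => row.getD c ' ') := by
    unfold pvCell
    exact pv_range_map_take (lines.map (fun l => pvLjust l w)) (fun row => row.getD c ' ') []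
      (lines.length - 1) (by rw [List.length_map]; omega)
  rw [h1, ← List.map_take, List.map_map, ← List.dropLast_eq_take]
  unfold pvColChars
  congr 1
  apply List.map_congr_left
  intro a _
  simp only [Function.comp_def]
  exact pvLjust_getD a w c

-- both sides apply int() to the same string: the values agree (even through the defaults)
theorem pvVal_eq (lines : List String) (w c : Nat) :
    pvValB (pvDigitsB lines) (c : Int) =
      pvNumA (lines.map (fun l => pvLjust l w)) lines.length c := by
  unfold pvValB pvNumA
  rw [pvColCharsA lines w c, PySem.Int.ofStr?_ofList, pvDigits_get? lines c]
  by_cases hnil : pvColChars lines c = []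
  · rw [if_pos hnil, hnil]
    simp
  · rw [if_neg hnil]
    simp


-- step-unfolding equations for A's whiles and B's range scan
theorem pvInnerA_eq_pos (grid : List (List Char)) (h w c : Nat)
    (hc : c < w) (hs : pvAllSpaceA grid h c = false) :
    pvInnerA grid h w c = (c :: (pvInnerA grid h w (c + 1)).1, (pvInnerA grid h w (c + 1)).2) := by
  unfold pvInnerA
  rw [show w - c = (w - (c + 1)) + 1 by omega]
  rw [pvInnerAGo, if_pos ⟨hc, hs⟩]

theorem pvInnerA_eq_neg (grid : List (List Char)) (h w c : Nat)
    (hcond : ¬ (c < w ∧ pvAllSpaceA grid h c = false)) :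
    pvInnerA grid h w c = ([], c) := by
  unfold pvInnerA
  cases hwc : w - c with
  | zero => rw [pvInnerAGo]
  | succ k => rw [pvInnerAGo, if_neg hcond]

theorem pvInnerAGo_snd_bounds (grid : List (List Char)) (h w : Nat) :
    ∀ fuel c, c ≤ (pvInnerAGo grid h w fuel c).2 ∧ (pvInnerAGo grid h w fuel c).2 ≤ max c w := by
  intro fuel
  induction fuel with
  | zero => intro c; rw [pvInnerAGo]; omega
  | succ n ih =>
    intro c
    rw [pvInnerAGo]
    by_cases hcond : c < w ∧ pvAllSpaceA grid h c = false
    · rw [if_pos hcond]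
      have := ih (c + 1)
      simp only []
      omega
    · rw [if_neg hcond]
      omega

-- the inner scan never moves left and stays ≤ w
theorem pvInnerA_snd_bounds (grid : List (List Char)) (h w : Nat) :
    ∀ n c, w - c ≤ n → c ≤ (pvInnerA grid h w c).2 ∧ ((pvInnerA grid h w c).2 ≤ max c w) := by
  intro n c _
  exact pvInnerAGo_snd_bounds grid h w (w - c) c

theorem pvInnerA_snd_gt (grid : List (List Char)) (h w c : Nat)
    (hc : c < w) (hs : pvAllSpaceA grid h c = false) : c < (pvInnerA grid h w c).2 := by
  rw [pvInnerA_eq_pos grid h w c hc hs]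
  have := pvInnerAGo_snd_bounds grid h w (w - (c + 1)) (c + 1)
  simp only [pvInnerA] at this ⊢
  omega

-- the outer scan's value does not depend on the fuel once the fuel reaches w - c
theorem pvOuterAGo_irrel (grid : List (List Char)) (h w : Nat) :
    ∀ n m c, w - c ≤ n → w - c ≤ m → pvOuterAGo grid h w n c = pvOuterAGo grid h w m c := by
  intro n
  induction n with
  | zero =>
    intro m c hn _
    have hcw : ¬ c < w := by omega
    cases m with
    | zero => rfl
    | succ k =>
      rw [pvOuterAGo, pvOuterAGo, if_neg hcw]
  | succ n ih =>
    intro m c hn hm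
    cases m with
    | zero =>
      have hcw : ¬ c < w := by omega
      rw [pvOuterAGo, pvOuterAGo, if_neg hcw]
    | succ k =>
      by_cases hcw : c < w
      · by_cases hs : pvAllSpaceA grid h c = true
        · rw [pvOuterAGo, pvOuterAGo, if_pos hcw, if_pos hcw, if_pos hs, if_pos hs]
          exact ih k (c + 1) (by omega) (by omega)
        · rw [pvOuterAGo, pvOuterAGo, if_pos hcw, if_pos hcw, if_neg hs, if_neg hs]
          have hs' : pvAllSpaceA grid h c = false := by
            cases hb : pvAllSpaceA grid h c with
            | false => rfl
            | true => exact absurd hb hs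
          have hgt := pvInnerA_snd_gt grid h w c hcw hs'
          exact congrArg _ (ih k (pvInnerA grid h w c).2 (by omega) (by omega))
      · rw [pvOuterAGo, pvOuterAGo, if_neg hcw, if_neg hcw]

theorem pvOuterA_eq_stop (grid : List (List Char)) (h w c : Nat) (hc : ¬ c < w) :
    pvOuterA grid h w c = [] := by
  unfold pvOuterA
  rw [show w - c = 0 by omega, pvOuterAGo]

theorem pvOuterA_eq_skip (grid : List (List Char)) (h w c : Nat)
    (hc : c < w) (hs : pvAllSpaceA grid h c = true) :
    pvOuterA grid h w c = pvOuterA grid h w (c + 1) := by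
  unfold pvOuterA
  rw [show w - c = (w - (c + 1)) + 1 by omega, pvOuterAGo, if_pos hc, if_pos hs]

theorem pvOuterA_eq_group (grid : List (List Char)) (h w c : Nat)
    (hc : c < w) (hs : pvAllSpaceA grid h c = false) :
    pvOuterA grid h w c =
      (((pvInnerA grid h w c).1.map (pvNumA grid h)).reverse) ::
        pvOuterA grid h w (pvInnerA grid h w c).2 := by
  unfold pvOuterA
  rw [show w - c = (w - (c + 1)) + 1 by omega, pvOuterAGo, if_pos hc, if_neg (by simp [hs])]
  have hgt := pvInnerA_snd_gt grid h w c hc hs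
  exact congrArg _ (pvOuterAGo_irrel grid h w (w - (c + 1)) (w - (pvInnerA grid h w c).2)
    (pvInnerA grid h w c).2 (by omega) (by omega))

theorem pvStep_occ (digits : PySem.Dict Int (List Char)) (occ : PySem.Set Int)
    (st : List Int × List (List Int)) (c : Int) (hc : PySem.Set.contains occ c = true) :
    pvGroupStepB digits occ st c = (st.1 ++ [pvValB digits c], st.2) := by
  unfold pvGroupStepB
  rw [if_pos hc]

theorem pvStep_nocc (digits : PySem.Dict Int (List Char)) (occ : PySem.Set Int)
    (st : List Int × List (List Int)) (c : Int) (hc : PySem.Set.contains occ c = false) :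
    pvGroupStepB digits occ st c = pvFlushB st := by
  unfold pvGroupStepB
  rw [hc]
  simp

theorem pvFlush_ne (st : List Int × List (List Int)) (hst : st.1 ≠ []) :
    pvFlushB st = ([], st.2 ++ [st.1.reverse]) := by
  unfold pvFlushB
  rw [if_pos hst]

theorem pvFlush_nil (probs : List (List Int)) : pvFlushB ([], probs) = ([], probs) := by
  unfold pvFlushB
  simp

-- B's range scan from inside a group, against A's inner while
theorem pvInnerB (digits : PySem.Dict Int (List Char)) (occ : PySem.Set Int)
    (grid : List (List Char)) (h w : Nat)
    (hOcc : ∀ k : Nat, (PySem.Set.contains occ (k : Int) = true) ↔ pvAllSpaceA grid h k = false)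
    (hVal : ∀ k : Nat, pvValB digits (k : Int) = pvNumA grid h k) :
    ∀ n c, w - c ≤ n → ∀ group probs, group ≠ [] →
      pvFlushB ((List.range' c (w - c)).foldl
          (fun st (k : Nat) => pvGroupStepB digits occ st (k : Int)) (group, probs)) =
      pvFlushB ((List.range' (pvInnerA grid h w c).2 (w - (pvInnerA grid h w c).2)).foldl
          (fun st (k : Nat) => pvGroupStepB digits occ st (k : Int))
          ([], probs ++ [(group ++ (pvInnerA grid h w c).1.map (pvNumA grid h)).reverse])) := by
  intro n
  induction n with
  | zero =>
    intro c hc group probs hgroup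
    have hcw : ¬ c < w := by omega
    rw [pvInnerA_eq_neg grid h w c (fun hx => hcw hx.1)]
    have h0 : w - c = 0 := by omega
    simp only [h0, List.range'_zero, List.foldl_nil, List.map_nil, List.append_nil]
    rw [pvFlush_ne _ hgroup, pvFlush_nil]
  | succ n ih =>
    intro c hc group probs hgroup
    by_cases hcw : c < w
    · by_cases hs : pvAllSpaceA grid h c = true
      · rw [pvInnerA_eq_neg grid h w c (by simp [hs])]
        have hocc : PySem.Set.contains occ (c : Int) = false := by
          cases hb : PySem.Set.contains occ (c : Int) with
          | false => rfl
          | true => exact absurd ((hOcc c).mp hb) (by simp [hs])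
        simp only [List.map_nil, List.append_nil]
        rw [pvRange'_cons c w hcw]
        simp only [List.foldl_cons]
        rw [pvStep_nocc _ _ _ _ hocc, pvStep_nocc _ _ _ _ hocc]
        rw [pvFlush_ne (group, probs) hgroup, pvFlush_nil (probs ++ [group.reverse])]
      · have hs' : pvAllSpaceA grid h c = false := by
          cases hb : pvAllSpaceA grid h c with
          | false => rfl
          | true => exact absurd hb hs
        rw [pvInnerA_eq_pos grid h w c hcw hs']
        have hocc : PySem.Set.contains occ (c : Int) = true := (hOcc c).mpr hs'
        rw [pvRange'_cons c w hcw]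
        simp only [List.foldl_cons]
        rw [pvStep_occ _ _ _ _ hocc]
        rw [hVal c]
        rw [show ((group, probs).1 ++ [pvNumA grid h c], (group, probs).2) =
          ((group ++ [pvNumA grid h c], probs) : List Int × List (List Int)) from rfl]
        rw [ih (c + 1) (by omega) (group ++ [pvNumA grid h c]) probs (by simp)]
        simp [List.append_assoc]
    · have hcw' : ¬ c < w := hcw
      rw [pvInnerA_eq_neg grid h w c (fun hx => hcw' hx.1)]
      have h0 : w - c = 0 := by omega
      simp only [h0, List.range'_zero, List.foldl_nil, List.map_nil, List.append_nil]
      rw [pvFlush_ne _ hgroup, pvFlush_nil]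

-- B's range scan from outside a group, against A's outer while
theorem pvOuterB (digits : PySem.Dict Int (List Char)) (occ : PySem.Set Int)
    (grid : List (List Char)) (h w : Nat)
    (hOcc : ∀ k : Nat, (PySem.Set.contains occ (k : Int) = true) ↔ pvAllSpaceA grid h k = false)
    (hVal : ∀ k : Nat, pvValB digits (k : Int) = pvNumA grid h k) :
    ∀ n c, w - c ≤ n → ∀ probs,
      pvFlushB ((List.range' c (w - c)).foldl
          (fun st (k : Nat) => pvGroupStepB digits occ st (k : Int)) ([], probs)) =
      ([], probs ++ pvOuterA grid h w c) := by
  intro n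
  induction n with
  | zero =>
    intro c hc probs
    have hcw : ¬ c < w := by omega
    rw [pvOuterA_eq_stop grid h w c hcw]
    have h0 : w - c = 0 := by omega
    simp only [h0, List.range'_zero, List.foldl_nil, List.append_nil]
    exact pvFlush_nil probs
  | succ n ih =>
    intro c hc probs
    by_cases hcw : c < w
    · by_cases hs : pvAllSpaceA grid h c = true
      · rw [pvOuterA_eq_skip grid h w c hcw hs]
        have hocc : PySem.Set.contains occ (c : Int) = false := by
          cases hb : PySem.Set.contains occ (c : Int) with
          | false => rfl
          | true => exact absurd ((hOcc c).mp hb) (by simp [hs])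
        rw [pvRange'_cons c w hcw]
        simp only [List.foldl_cons]
        rw [pvStep_nocc _ _ _ _ hocc, pvFlush_nil]
        exact ih (c + 1) (by omega) probs
      · have hs' : pvAllSpaceA grid h c = false := by
          cases hb : pvAllSpaceA grid h c with
          | false => rfl
          | true => exact absurd hb hs
        rw [pvOuterA_eq_group grid h w c hcw hs']
        have hocc : PySem.Set.contains occ (c : Int) = true := (hOcc c).mpr hs'
        rw [pvRange'_cons c w hcw]
        simp only [List.foldl_cons]
        rw [pvStep_occ _ _ _ _ hocc]
        simp only [List.nil_append]
        rw [hVal c]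
        rw [pvInnerB digits occ grid h w hOcc hVal n (c + 1) (by omega) [pvNumA grid h c] probs
          (by simp)]
        have hb1 := pvInnerA_snd_bounds grid h w (w - (c + 1)) (c + 1) (le_refl _)
        rw [ih ((pvInnerA grid h w (c + 1)).2) (by omega)]
        rw [pvInnerA_eq_pos grid h w c hcw hs']
        simp
    · have hcw' : ¬ c < w := hcw
      rw [pvOuterA_eq_stop grid h w c hcw']
      have h0 : w - c = 0 := by omega
      simp only [h0, List.range'_zero, List.foldl_nil, List.append_nil]
      exact pvFlush_nil probs

theorem pv_main (lines : List String) : parse_cephalopod lines = parse_cephalopod_alt lines := by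
  unfold parse_cephalopod parse_cephalopod_alt
  by_cases hnil : lines = []
  · simp [hnil]
  · rw [if_neg hnil, if_neg hnil]
    dsimp only []
    have hpy : PySem.List.pyRange 0 (((lines.map (fun l : String => l.toList.length)).max?).getD 0 : Int) 1 =
        (List.range (((lines.map (fun l : String => l.toList.length)).max?).getD 0)).map
          (fun k : Nat => (k : Int)) :=
      PySem.List.pyRange_zero_natCast _
    rw [hpy, List.foldl_map]
    rw [show List.range (((lines.map (fun l : String => l.toList.length)).max?).getD 0) =
        List.range' 0 (((lines.map (fun l : String => l.toList.length)).max?).getD 0 - 0) by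
      rw [Nat.sub_zero, List.range_eq_range']]
    have hOcc : ∀ k : Nat, (PySem.Set.contains (pvOccB lines) (k : Int) = true) ↔
        pvAllSpaceA (lines.map (fun l : String =>
          pvLjust l (((lines.map (fun l : String => l.toList.length)).max?).getD 0))) lines.length k = false :=
      fun k => pvOcc_iff lines hnil _ k
    have hVal : ∀ k : Nat, pvValB (pvDigitsB lines) (k : Int) =
        pvNumA (lines.map (fun l : String =>
          pvLjust l (((lines.map (fun l : String => l.toList.length)).max?).getD 0))) lines.length k :=
      fun k => pvVal_eq lines _ k
    rw [pvOuterB (pvDigitsB lines) (pvOccB lines) _ lines.length _ hOcc hVal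
      (((lines.map (fun l : String => l.toList.length)).max?).getD 0) 0 (by omega) []]
    simp

-- ===== VERDICT (by name: the statement is the Claim_ definition above) =====
theorem parse_cephalopod_spec : Claim_equal_parse_cephalopod := by
  intro lines _ _
  unfold Spec_parse_cephalopod
  exact pv_main lines
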